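-- pv_equiv track=rewrite | github.com/BeiJielxc/json-repair-script | main.py | balance_brackets_smart
-- ===== SOURCE A (Python) =====
-- from typing import Tuple, List
--
-- def balance_brackets_smart(s: str) -> Tuple[str, List[str]]:
--     """智能平衡括号：使用栈追踪嵌套结构"""
--     diagnostics = []
--
--     def strip_strings(text: str) -> str:
--         result = []
--         in_string = False
--         escape_next = False
--         for char in text:
--             if escape_next:
--                 escape_next = False
--                 result.append(' ')
--                 continue
--             if char == '\\':
--                 escape_next = True
--                 result.append(' ')
--                 continue
--             if char == '"':
--                 in_string = not in_string
--                 result.append('"')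
--             elif not in_string:
--                 result.append(char)
--             else:
--                 result.append(' ')
--         return ''.join(result)
--
--     stripped = strip_strings(s)
--
--     stack = []
--     positions = []
--
--     for i, char in enumerate(stripped):
--         if char in '{[':
--             stack.append(char)
--             positions.append(i)
--         elif char in '}]':
--             expected = '{' if char == '}' else '['
--             if stack and stack[-1] == expected:
--                 stack.pop()
--                 positions.pop()
--
--     if stack:
--         closing = []
--         for bracket in reversed(stack):
--             if bracket == '{':
--                 closing.append('}')
--             else:
--                 closing.append(']')
--
--         s += ''.join(closing)
--         diagnostics.append(f"Appended {len(closing)} missing brackets: {''.join(closing)}")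
--
--     return s, diagnostics
-- ===== SOURCE B (Python) =====
-- def balance_brackets_smart(s):
--     """One fused pass: track in_string/escape and the bracket stack together."""
--     stack = []
--     in_string = False
--     escape = False
--     for ch in s:
--         if escape:
--             escape = False
--         elif ch == '\\':
--             escape = True
--         elif ch == '"':
--             in_string = not in_string
--         elif not in_string:
--             if ch in '{[':
--                 stack.append(ch)
--             elif ch in '}]':
--                 if stack and stack[-1] == ('{' if ch == '}' else '['):
--                     stack.pop()
--     if not stack:
--         return s, []
--     closing = ''.join('}' if b == '{' else ']' for b in reversed(stack))
--     return s + closing, [f"Appended {len(closing)} missing brackets: {closing}"]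
-- ===== Notes on version B (the rewrite author's own statement) =====
-- stated objective: simpler
-- what changed: Replaced A's two-pass design (build a string-blanked copy, then scan it with a stack plus a vestigial positions list) by one fused pass over the original string maintaining in_string, escape and the bracket stack together, dropping the intermediate string and the positions list.
import Mathlib
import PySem

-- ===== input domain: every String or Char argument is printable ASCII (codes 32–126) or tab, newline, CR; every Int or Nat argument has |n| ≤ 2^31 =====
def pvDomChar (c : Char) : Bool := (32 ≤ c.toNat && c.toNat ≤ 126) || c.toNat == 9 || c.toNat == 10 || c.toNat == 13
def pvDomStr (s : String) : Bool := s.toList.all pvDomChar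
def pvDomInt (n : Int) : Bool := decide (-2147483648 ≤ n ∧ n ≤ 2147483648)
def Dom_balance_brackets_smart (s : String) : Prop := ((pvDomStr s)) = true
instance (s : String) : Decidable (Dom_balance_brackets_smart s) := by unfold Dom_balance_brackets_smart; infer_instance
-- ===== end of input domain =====

-- B fuses A's two passes (string-stripping, then bracket scan with a vestigial positions list)
-- into one loop over the original string; equivalence of return values is proved (no side effects involved).

-- ===== PORT A =====
-- strip_strings: blank string contents and escaped chars (escape applies even outside strings)
def pvStripA : List Char → Bool → Bool → List Char
  | [], _, _ => []
  | c :: cs, inStr, esc =>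
    if esc then ' ' :: pvStripA cs inStr false
    else if c = '\\' then ' ' :: pvStripA cs inStr true
    else if c = '"' then '"' :: pvStripA cs (!inStr) esc
    else if !inStr then c :: pvStripA cs inStr esc
    else ' ' :: pvStripA cs inStr esc

-- the enumerate loop over the stripped text: stack and positions, pop only on a matching top
def pvScanA : List Char → Int → List Char → List Int → List Char × List Int
  | [], _, stack, positions => (stack, positions)
  | c :: cs, i, stack, positions =>
    if c = '{' ∨ c = '[' then pvScanA cs (i + 1) (stack ++ [c]) (positions ++ [i])
    else if c = '}' ∨ c = ']' then
      let expected := if c = '}' then '{' else '['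
      if stack ≠ [] ∧ PySem.List.pyGet? stack (-1) = some expected then
        pvScanA cs (i + 1) stack.dropLast positions.dropLast
      else pvScanA cs (i + 1) stack positions
    else pvScanA cs (i + 1) stack positions

def balance_brackets_smart (s : String) : String × List String :=
  let stripped := pvStripA s.toList false false
  let p := pvScanA stripped 0 [] []
  let stack := p.1
  if stack = [] then (s, [])
  else
    let closing := stack.reverse.map (fun b => if b = '{' then '}' else ']')
    (String.ofList (s.toList ++ closing),
     ["Appended " ++ PySem.Int.toStr (closing.length : Int) ++ " missing brackets: " ++ String.ofList closing])

-- ===== PORT B =====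
-- one fused pass: in_string, escape and the stack evolve together over the original chars
def pvFusedB : List Char → Bool → Bool → List Char → List Char
  | [], _, _, stack => stack
  | c :: cs, inStr, esc, stack =>
    if esc then pvFusedB cs inStr false stack
    else if c = '\\' then pvFusedB cs inStr true stack
    else if c = '"' then pvFusedB cs (!inStr) esc stack
    else if !inStr then
      if c = '{' ∨ c = '[' then pvFusedB cs inStr esc (stack ++ [c])
      else if c = '}' ∨ c = ']' then
        if stack ≠ [] ∧ PySem.List.pyGet? stack (-1) = some (if c = '}' then '{' else '[') then
          pvFusedB cs inStr esc stack.dropLast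
        else pvFusedB cs inStr esc stack
      else pvFusedB cs inStr esc stack
    else pvFusedB cs inStr esc stack

def balance_brackets_smart_alt (s : String) : String × List String :=
  let stack := pvFusedB s.toList false false []
  if stack = [] then (s, [])
  else
    let closing := stack.reverse.map (fun b => if b = '{' then '}' else ']')
    (String.ofList (s.toList ++ closing),
     ["Appended " ++ PySem.Int.toStr (closing.length : Int) ++ " missing brackets: " ++ String.ofList closing])

-- ===== PRECONDITION & SPEC =====
def Spec_balance_brackets_smart (s : String) (out : String × List String) : Prop := out = balance_brackets_smart_alt s
instance (s : String) (out : String × List String) : Decidable (Spec_balance_brackets_smart s out) := by unfold Spec_balance_brackets_smart; infer_instance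

-- ===== CLAIM (what is proved, stated in full; the proofs are below) =====
def Claim_equal_balance_brackets_smart : Prop := ∀ (s : String), Dom_balance_brackets_smart s → Spec_balance_brackets_smart s (balance_brackets_smart s)

-- ===== LEMMAS AND PROOFS =====
-- Fusing: scanning A's stripped text yields exactly B's fused stack, for any state.
theorem pvScan_strip_eq_fused (cs : List Char) : ∀ (inStr esc : Bool) (i : Int)
    (stack : List Char) (positions : List Int),
    (pvScanA (pvStripA cs inStr esc) i stack positions).1 = pvFusedB cs inStr esc stack := by
  induction cs with
  | nil => intro inStr esc i stack positions; simp [pvStripA, pvScanA, pvFusedB]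
  | cons c cs ih =>
    intro inStr esc i stack positions
    by_cases hesc : esc
    · simp [pvStripA, pvScanA, pvFusedB, hesc, ih]
    · by_cases hbs : c = '\\'
      · simp [pvStripA, pvScanA, pvFusedB, hesc, hbs, ih]
      · by_cases hq : c = '"'
        · simp [pvStripA, pvScanA, pvFusedB, hesc, hq, ih]
        · by_cases hin : inStr
          · simp [pvStripA, pvScanA, pvFusedB, hesc, hbs, hq, hin, ih]
          · simp only [pvStripA, if_neg hesc, if_neg hbs, if_neg hq, hin, Bool.not_false, if_pos]
            simp only [pvScanA, pvFusedB, Bool.not_false, if_pos, if_neg hesc, if_neg hbs,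
              if_neg hq]
            split_ifs <;> simp [ih]

-- ===== VERDICT (by name: the statement is the Claim_ definition above) =====
theorem balance_brackets_smart_spec : Claim_equal_balance_brackets_smart := by
  intro s _
  unfold Spec_balance_brackets_smart balance_brackets_smart balance_brackets_smart_alt
  simp only [pvScan_strip_eq_fused]
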